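-- pv_equiv track=rewrite | github.com/chadheyne/project-euler | problem125.py | generate_squares
-- ===== SOURCE A (Python) =====
-- def generate_squares(limit=10000):
--     numbers = []
--     for number in range(1, limit + 1):
--         i, number = number + 1, number ** 2
--         while number < limit ** 2:
--             number, i = number + i ** 2, i + 1
--             numbers.append(number)
--     return set(numbers)
-- ===== SOURCE B (Python) =====
-- def generate_squares(limit=10000):
--     # closed-form partial sums: pyr(n) = 1^2 + 2^2 + ... + n^2
--     def pyr(n):
--         return n * (n + 1) * (2 * n + 1) // 6
--     res = set()
--     lim2 = limit ** 2
--     for a in range(1, limit + 1):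
--         base = pyr(a - 1)
--         b = a + 1
--         while pyr(b - 1) - base < lim2:
--             res.add(pyr(b) - base)
--             b += 1
--     return res
-- ===== Notes on version B (the rewrite author's own statement) =====
-- stated objective: alternative
-- what changed: B replaces A's running accumulator of consecutive squares by the closed-form square-pyramidal prefix-sum formula, computing each consecutive-square sum as a difference of two prefix sums and inserting it into the set directly instead of building a list first.
import Mathlib
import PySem

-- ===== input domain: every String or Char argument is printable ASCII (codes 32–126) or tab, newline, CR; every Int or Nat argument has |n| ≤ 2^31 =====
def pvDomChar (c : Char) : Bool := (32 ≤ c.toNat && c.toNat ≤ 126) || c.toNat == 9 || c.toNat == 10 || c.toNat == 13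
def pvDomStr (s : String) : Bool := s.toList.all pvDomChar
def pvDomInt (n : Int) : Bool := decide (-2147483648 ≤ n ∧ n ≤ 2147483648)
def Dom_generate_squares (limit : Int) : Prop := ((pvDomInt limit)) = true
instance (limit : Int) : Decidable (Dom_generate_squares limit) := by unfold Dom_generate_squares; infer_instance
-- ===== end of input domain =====

-- B computes each sum of consecutive squares via the closed-form prefix sum pyr(n)=n(n+1)(2n+1)//6 instead of A's running accumulator (alternative decomposition, same cost).


-- ===== PORT A =====
-- inner while-loop of A: state (number, i), appends each new partial sum;
-- the guard `0 < i` only makes the recursion total (it holds on every actual call)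
def pvLoopA (lim2 number i : Int) (acc : List Int) : List Int :=
  if h : number < lim2 ∧ 0 < i then
    pvLoopA lim2 (number + i ^ 2) (i + 1) (acc ++ [number + i ^ 2])
  else acc
termination_by (lim2 - number).toNat
decreasing_by
  have h2 : 1 ≤ i ^ 2 := by nlinarith [h.2]
  omega

def generate_squares (limit : Int) : List Int :=
  let numbers := (PySem.List.pyRange 1 (limit + 1) 1).foldl
    (fun acc number => pvLoopA (limit ^ 2) (number ^ 2) (number + 1) acc) []
  PySem.Set.ofList numbers

-- ===== PORT B =====
-- closed-form prefix sum of squares: pyr n = n*(n+1)*(2*n+1) // 6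
def pvPyr (n : Int) : Int := PySem.Int.floordiv (n * (n + 1) * (2 * n + 1)) 6

-- the step identity of the closed form (cited by pvLoopB's termination proof)
theorem pvPyr_succ (n : Int) : pvPyr n = pvPyr (n - 1) + n ^ 2 := by
  unfold pvPyr
  rw [PySem.Int.floordiv_eq_ediv_of_pos (by norm_num),
      PySem.Int.floordiv_eq_ediv_of_pos (by norm_num)]
  have h : n * (n + 1) * (2 * n + 1) = (n - 1) * ((n - 1) + 1) * (2 * (n - 1) + 1) + n ^ 2 * 6 := by
    ring
  rw [h, Int.add_mul_ediv_right _ _ (by norm_num : (6 : ℤ) ≠ 0)]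

-- inner while-loop of B; the guard `0 < b` only makes the recursion total
def pvLoopB (lim2 base b : Int) (res : PySem.Set Int) : PySem.Set Int :=
  if h : pvPyr (b - 1) - base < lim2 ∧ 0 < b then
    pvLoopB lim2 base (b + 1) (PySem.Set.add res (pvPyr b - base))
  else res
termination_by (lim2 - (pvPyr (b - 1) - base)).toNat
decreasing_by
  have h1 := pvPyr_succ b
  have h2 : 1 ≤ b ^ 2 := by nlinarith [h.2]
  simp only [add_sub_cancel_right]
  omega

def generate_squares_alt (limit : Int) : List Int :=
  (PySem.List.pyRange 1 (limit + 1) 1).foldl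
    (fun res a => pvLoopB (limit ^ 2) (pvPyr (a - 1)) (a + 1) res)
    PySem.Set.empty

-- ===== PRECONDITION & SPEC =====
def Spec_generate_squares (limit : Int) (out : List Int) : Prop := out = generate_squares_alt limit
instance (limit : Int) (out : List Int) : Decidable (Spec_generate_squares limit out) := by unfold Spec_generate_squares; infer_instance

-- ===== CLAIM (what is proved, stated in full; the proofs are below) =====
def Claim_equal_generate_squares : Prop := ∀ (limit : Int), Dom_generate_squares limit → Spec_generate_squares limit (generate_squares limit)

-- ===== LEMMAS AND PROOFS =====

theorem pvSet_ofList_append (acc : List Int) (x : Int) :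
    PySem.Set.ofList (acc ++ [x]) = PySem.Set.add (PySem.Set.ofList acc) x := by
  rw [PySem.Set.ofList_eq_foldl, PySem.Set.ofList_eq_foldl, List.foldl_append]
  rfl

-- the two inner loops agree: B's state (b, res) corresponds to A's (pyr(b-1)-pyr(a-1), b, acc)
theorem pvLoop_eq (lim2 base : Int) :
    ∀ (k : Nat) (b : Int) (acc : List Int),
      (lim2 - (pvPyr (b - 1) - base)).toNat ≤ k →
      pvLoopB lim2 base b (PySem.Set.ofList acc) =
        PySem.Set.ofList (pvLoopA lim2 (pvPyr (b - 1) - base) b acc) := by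
  intro k
  induction k with
  | zero =>
    intro b acc hk
    rw [pvLoopB, pvLoopA]
    split
    · rename_i h; omega
    · rfl
  | succ k ih =>
    intro b acc hk
    rw [pvLoopB, pvLoopA]
    split
    · rename_i h
      have h1 := pvPyr_succ b
      have h2 : 1 ≤ b ^ 2 := by nlinarith [h.2]
      have hx : pvPyr (b - 1) - base + b ^ 2 = pvPyr b - base := by omega
      rw [hx, ← pvSet_ofList_append]
      have := ih (b + 1) (acc ++ [pvPyr b - base]) (by simp only [add_sub_cancel_right]; omega)
      simp only [add_sub_cancel_right] at this
      exact this
    · rfl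

-- the outer folds agree, for any list of positive start values
theorem pvFold_eq (lim2 : Int) :
    ∀ (l : List Int) (acc : List Int), (∀ x ∈ l, 0 < x) →
      l.foldl (fun res a => pvLoopB lim2 (pvPyr (a - 1)) (a + 1) res) (PySem.Set.ofList acc) =
        PySem.Set.ofList (l.foldl (fun acc n => pvLoopA lim2 (n ^ 2) (n + 1) acc) acc) := by
  intro l
  induction l with
  | nil => intro acc _; rfl
  | cons a l ih =>
    intro acc hpos
    simp only [List.foldl_cons]
    have ha : 0 < a := hpos a (List.mem_cons_self)
    have hstep : pvLoopB lim2 (pvPyr (a - 1)) (a + 1) (PySem.Set.ofList acc) =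
        PySem.Set.ofList (pvLoopA lim2 (a ^ 2) (a + 1) acc) := by
      have h := pvLoop_eq lim2 (pvPyr (a - 1))
        (lim2 - (pvPyr ((a + 1) - 1) - pvPyr (a - 1))).toNat (a + 1) acc le_rfl
      have hs : pvPyr ((a + 1) - 1) - pvPyr (a - 1) = a ^ 2 := by
        have := pvPyr_succ a
        simp only [add_sub_cancel_right]
        omega
      rw [hs] at h
      exact h
    rw [hstep]
    exact ih _ (fun x hx => hpos x (List.mem_cons_of_mem _ hx))

-- ===== VERDICT (by name: the statement is the Claim_ definition above) =====
theorem generate_squares_spec : Claim_equal_generate_squares := by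
  intro limit _
  unfold Spec_generate_squares generate_squares generate_squares_alt
  have hpos : ∀ x ∈ PySem.List.pyRange 1 (limit + 1) 1, (0 : Int) < x := by
    intro x hx
    have := (PySem.List.mem_pyRange_one).mp hx
    omega
  have h := pvFold_eq (limit ^ 2) (PySem.List.pyRange 1 (limit + 1) 1) [] hpos
  exact h.symm
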